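-- pv_equiv track=rewrite | github.com/miliar/Code_Jam_Webscraper | solutions_python/solutions_year15_round0_nr1/1438.py | friends_num
-- ===== SOURCE A (Python) =====
-- def friends_num(max_shy, audience):
--     f_num = 0
--     audience_part_sum = 0
--     for i in range(1, max_shy + 1):
--         audience_part_sum += audience[i - 1]
--         if audience_part_sum < i:
--             f_num += i - audience_part_sum
--             audience_part_sum = i
--
--     return f_num
-- ===== SOURCE B (Python) =====
-- def friends_num(max_shy, audience):
--     # Two passes: build the prefix-sum table of audience[:max_shy],
--     # then the answer is the largest shortfall max(0, max_i (i - prefix[i-1])).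
--     prefix = []
--     total = 0
--     for x in audience[:max_shy]:
--         total += x
--         prefix.append(total)
--     return max([0] + [i - prefix[i - 1] for i in range(1, max_shy + 1)])
-- ===== Notes on version B (the rewrite author's own statement) =====
-- stated objective: alternative
-- what changed: Replaces the stateful greedy loop (conditionally topping up the running sum and accumulating invitations) with a two-pass build-table-then-reduce form: first the true prefix sums of audience[:max_shy], then the answer as the maximum over i of the shortfall i - prefix[i-1], together with 0.
import Mathlib
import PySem

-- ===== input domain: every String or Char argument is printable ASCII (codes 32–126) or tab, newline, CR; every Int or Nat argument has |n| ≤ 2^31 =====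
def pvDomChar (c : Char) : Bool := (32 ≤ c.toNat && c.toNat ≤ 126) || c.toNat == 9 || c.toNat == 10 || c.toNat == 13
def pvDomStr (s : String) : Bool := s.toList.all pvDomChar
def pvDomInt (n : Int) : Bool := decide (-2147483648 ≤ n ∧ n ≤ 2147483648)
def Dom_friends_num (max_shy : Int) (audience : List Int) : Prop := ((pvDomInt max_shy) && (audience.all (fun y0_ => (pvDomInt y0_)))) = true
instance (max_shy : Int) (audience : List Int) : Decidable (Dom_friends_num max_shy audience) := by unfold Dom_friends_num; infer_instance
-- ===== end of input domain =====

-- B replaces A's stateful greedy (conditional top-up of a running sum) with a two-pass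
-- prefix-table-then-max decomposition; same O(n) cost, alternative structure.


-- ===== PORT A =====
def friends_num (max_shy : Int) (audience : List Int) : Int :=
  -- f_num = 0; audience_part_sum = 0; for i in range(1, max_shy+1): ...
  let st := (PySem.List.pyRange 1 (max_shy + 1)).foldl
    (fun st i =>
      let s := st.2 + PySem.List.pyGetD audience (i - 1) 0
      if s < i then (st.1 + (i - s), i) else (st.1, s)) (0, 0)
  st.1

-- ===== PORT B =====
-- the prefix-building loop of Source B: total += x; prefix.append(total)
def pvAccum : List Int → Int → List Int
  | [], _ => []
  | x :: xs, t => (t + x) :: pvAccum xs (t + x)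

def friends_num_alt (max_shy : Int) (audience : List Int) : Int :=
  let pre := pvAccum (PySem.List.slice audience none (some max_shy)) 0
  let cands := 0 :: (PySem.List.pyRange 1 (max_shy + 1)).map
      (fun i => i - PySem.List.pyGetD pre (i - 1) 0)
  -- max([0] + [...]) : cands is nonempty, so max? is always some
  ((PySem.List.max? cands (fun y => y)).getD 0)

-- ===== PRECONDITION & SPEC =====
-- Pre_ excludes max_shy > len(audience), where Python A raises IndexError (audience[i-1]).
def Pre_friends_num (max_shy : Int) (audience : List Int) : Prop :=
  max_shy ≤ (audience.length : Int)
instance (max_shy : Int) (audience : List Int) : Decidable (Pre_friends_num max_shy audience) := by unfold Pre_friends_num; infer_instance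

def pvWitness_friends_num : Int × List Int := (3, [1, 0, 2])

def Spec_friends_num (max_shy : Int) (audience : List Int) (out : Int) : Prop := out = friends_num_alt max_shy audience
instance (max_shy : Int) (audience : List Int) (out : Int) : Decidable (Spec_friends_num max_shy audience out) := by unfold Spec_friends_num; infer_instance

-- ===== CLAIM (what is proved, stated in full; the proofs are below) =====
def Claim_equal_friends_num : Prop := ∀ (max_shy : Int) (audience : List Int), Dom_friends_num max_shy audience → Pre_friends_num max_shy audience → Spec_friends_num max_shy audience (friends_num max_shy audience)

-- ===== LEMMAS AND PROOFS =====

-- prefix sums of audience, and the running maximum of shortfalls, as reference values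
def pvP (audience : List Int) (k : Nat) : Int := (audience.take k).sum
def pvM (audience : List Int) (n : Nat) : Int :=
  ((List.range n).map (fun (j : Nat) => ((j : Int) + 1) - pvP audience (j + 1))).foldl max 0


lemma pvAccum_getD (xs : List Int) (t : Int) (j : Nat) (h : j < xs.length) :
    (pvAccum xs t).getD j 0 = t + (xs.take (j + 1)).sum := by
  induction xs generalizing t j with
  | nil => simp at h
  | cons x xs ih =>
    cases j with
    | zero => simp [pvAccum]
    | succ j =>
      simp only [pvAccum, List.getD_cons_succ, List.take_succ_cons, List.sum_cons]
      rw [ih (t + x) j (by simpa using h)]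
      ring

lemma pyRange_one_map (n : Nat) :
    PySem.List.pyRange 1 ((n : Int) + 1) = (List.range n).map (fun (j : Nat) => (j : Int) + 1) := by
  induction n with
  | zero => simp [PySem.List.pyRange_one_eq_nil]
  | succ n ih =>
    rw [show ((n + 1 : Nat) : Int) + 1 = ((n : Int) + 1) + 1 by push_cast; ring,
      PySem.List.pyRange_one_succ_right (by omega), ih, List.range_succ, List.map_append]
    simp

lemma loopA_eq (audience : List Int) (n : Nat) (h : n ≤ audience.length) :
    ((PySem.List.pyRange 1 ((n : Int) + 1)).foldl
      (fun st i =>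
        let s := st.2 + PySem.List.pyGetD audience (i - 1) 0
        if s < i then (st.1 + (i - s), i) else (st.1, s)) ((0 : Int), (0 : Int)))
    = (pvM audience n, pvP audience n + pvM audience n) := by
  induction n with
  | zero => simp [PySem.List.pyRange_one_eq_nil, pvM, pvP]
  | succ n ih =>
    rw [show ((n + 1 : Nat) : Int) + 1 = ((n : Int) + 1) + 1 by push_cast; ring,
      PySem.List.pyRange_one_succ_right (by omega), List.foldl_append,
      ih (by omega)]
    have hget : PySem.List.pyGetD audience (((n : Int) + 1) - 1) 0 = audience[n]'(by omega) := by
      rw [show ((n : Int) + 1) - 1 = (n : Int) by ring,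
        PySem.List.pyGetD_eq_getElem audience 0 (by omega) (by omega)]
      simp
    have hP : pvP audience (n + 1) = pvP audience n + audience[n]'(by omega) := by
      simpa [pvP] using List.sum_take_succ audience n (by omega)
    have hM : pvM audience (n + 1) = max (pvM audience n) (((n : Int) + 1) - pvP audience (n + 1)) := by
      simp [pvM, List.range_succ]
    simp only [List.foldl_cons, List.foldl_nil, hget]
    split_ifs with hc
    · have hd : pvM audience n < ((n : Int) + 1) - pvP audience (n + 1) := by omega
      rw [hM, max_eq_right hd.le]
      exact Prod.ext (by omega) (by omega)
    · have hd : ((n : Int) + 1) - pvP audience (n + 1) ≤ pvM audience n := by omega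
      rw [hM, max_eq_left hd]
      exact Prod.ext (by omega) (by omega)
  
lemma altB_eq (audience : List Int) (n : Nat) (h : n ≤ audience.length) :
    friends_num_alt (n : Int) audience = pvM audience n := by
  simp only [friends_num_alt]
  rw [PySem.List.slice_to_natCast, pyRange_one_map, List.map_map]
  have hmap : ∀ j ∈ List.range n,
      ((fun i => i - PySem.List.pyGetD (pvAccum (audience.take n) 0) (i - 1) 0) ∘
        (fun (j : Nat) => (j : Int) + 1)) j
      = ((j : Int) + 1) - pvP audience (j + 1) := by
    intro j hj
    have hj' : j < n := List.mem_range.mp hj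
    simp only [Function.comp]
    rw [show ((j : Int) + 1) - 1 = (j : Int) by ring,
      PySem.List.pyGetD_of_nonneg _ _ (by positivity)]
    rw [Int.toNat_natCast,
      pvAccum_getD _ _ j (by simp; omega)]
    simp [pvP, List.take_take, Nat.min_eq_left (by omega : j + 1 ≤ n)]
  rw [List.map_congr_left hmap, PySem.List.max?_id_cons]
  simp [pvM]

-- ===== VERDICT (by name: the statement is the Claim_ definition above) =====
theorem friends_num_spec : Claim_equal_friends_num := by
  intro max_shy audience _ hpre
  unfold Spec_friends_num
  by_cases hneg : max_shy < 0
  · simp only [friends_num, friends_num_alt]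
    rw [PySem.List.pyRange_one_eq_nil (show max_shy + 1 ≤ 1 by omega)]
    simp [PySem.List.max?_id_cons]
  · obtain ⟨n, rfl⟩ : ∃ n : Nat, max_shy = (n : Int) :=
      ⟨max_shy.toNat, (Int.toNat_of_nonneg (by omega)).symm⟩
    have hn : n ≤ audience.length := by
      unfold Pre_friends_num at hpre; omega
    rw [altB_eq audience n hn]
    simp only [friends_num]
    rw [loopA_eq audience n hn]
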